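-- pv_equiv track=rewrite | github.com/sydney0zq/LeetCode | leetcode/easy/0696.py | find_common_length
-- ===== SOURCE A (Python) =====
-- def find_common_length(s):
--     templ = s[0]
--     count = 1
--     for c in s[1:]:
--         if templ == c:
--             count += 1
--         else:
--             break
--     return count
-- ===== SOURCE B (Python) =====
-- def find_common_length(s):
--     templ = s[0]
--     return len(s) - len(s.lstrip(templ))
-- ===== Notes on version B (the rewrite author's own statement) =====
-- stated objective: idiomatic
-- what changed: Replaces the explicit count-and-break loop with a single lstrip-based computation: the leading run length is len(s) - len(s.lstrip(s[0])).
import Mathlib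
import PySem

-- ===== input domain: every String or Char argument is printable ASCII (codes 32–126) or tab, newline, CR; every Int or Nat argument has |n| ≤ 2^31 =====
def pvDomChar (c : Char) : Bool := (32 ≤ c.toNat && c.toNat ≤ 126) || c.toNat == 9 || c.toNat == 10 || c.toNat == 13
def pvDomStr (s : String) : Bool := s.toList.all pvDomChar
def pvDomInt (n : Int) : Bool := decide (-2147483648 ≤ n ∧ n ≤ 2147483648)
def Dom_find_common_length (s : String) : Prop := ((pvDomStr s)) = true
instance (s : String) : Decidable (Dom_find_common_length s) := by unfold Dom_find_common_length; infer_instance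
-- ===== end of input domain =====

-- B replaces A's count-and-break loop by the lstrip-based closed computation len(s) - len(s.lstrip(s[0])) (idiomatic; same cost).

-- ===== PORT A =====
-- the 'for c in s[1:]: if templ == c: count += 1 else: break' loop, step for step
def fclLoop (templ : Char) (count : Int) : List Char → Int
  | [] => count
  | c :: cs => if templ == c then fclLoop templ (count + 1) cs else count

def find_common_length (s : String) : Int :=
  match PySem.Str.pyGet? s 0 with
  | none => 0                       -- s[0] raises IndexError here: excluded by Pre_
  | some templ => fclLoop templ 1 (s.toList.drop 1)   -- s[1:] = drop 1 (exact for index 1 ≥ 0)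

-- ===== PORT B =====
def find_common_length_alt (s : String) : Int :=
  match PySem.Str.pyGet? s 0 with
  | none => 0                       -- s[0] raises IndexError here: excluded by Pre_
  | some templ =>
      -- s.lstrip(templ) with a single-char argument removes exactly the leading run of templ = dropWhile (· == templ); exact
      PySem.Str.len s - ((s.toList.dropWhile (fun c => c == templ)).length : Int)

-- ===== PRECONDITION & SPEC =====
-- Pre_ excludes only the empty string, on which A (and B) raise IndexError at s[0]
def Pre_find_common_length (s : String) : Prop := s ≠ ""
instance (s : String) : Decidable (Pre_find_common_length s) := by unfold Pre_find_common_length; infer_instance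
def pvWitness_find_common_length : String := "aab"

def Spec_find_common_length (s : String) (out : Int) : Prop := out = find_common_length_alt s
instance (s : String) (out : Int) : Decidable (Spec_find_common_length s out) := by unfold Spec_find_common_length; infer_instance

-- ===== CLAIM (what is proved, stated in full; the proofs are below) =====
def Claim_equal_find_common_length : Prop := ∀ (s : String), Dom_find_common_length s → Pre_find_common_length s → Spec_find_common_length s (find_common_length s)

-- ===== LEMMAS AND PROOFS =====
theorem fclLoop_eq (templ : Char) (cs : List Char) (n : Int) :
    fclLoop templ n cs = n + (cs.length : Int) - ((cs.dropWhile (fun c => c == templ)).length : Int) := by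
  induction cs generalizing n with
  | nil => simp [fclLoop, List.dropWhile]
  | cons c cs ih =>
    by_cases h : templ = c
    · subst h
      simp [fclLoop, List.dropWhile, ih]
      omega
    · have h1 : (templ == c) = false := by simpa using h
      have h2 : (c == templ) = false := by simpa using Ne.symm h
      simp [fclLoop, List.dropWhile, h1, h2]

-- ===== VERDICT (by name: the statement is the Claim_ definition above) =====
theorem find_common_length_spec : Claim_equal_find_common_length := by
  intro s _ hpre
  unfold Spec_find_common_length find_common_length find_common_length_alt
  have hne : s.toList ≠ [] := by
    intro h
    exact hpre (by simpa using String.toList_eq_nil_iff.mp h)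
  obtain ⟨c, cs, hcs⟩ := List.exists_cons_of_ne_nil hne
  have hget : PySem.Str.pyGet? s 0 = some c := by
    simp [PySem.Str.pyGet?, hcs]
  rw [hget, PySem.Str.len_eq, hcs]
  simp [List.dropWhile, fclLoop_eq]
  omega
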